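-- pv_equiv track=rewrite | github.com/IAEA-NDS/exforparser | parser/exfor_block.py | get_text_location_index
-- ===== SOURCE A (Python) =====
-- def get_text_location_index(block, line_num, position):
--     """
--     Input:
--         block: whole block of identifier-pointer
--         line_num: line number
--         position: last position where parenthese closed
--     Output:
--         i: line number (list index)
--         l - position: text start position in the i_th line
--     """
--
--     l = 0
--     i = 0
--
--     for i in range(len(block)):
--         if i < line_num:
--             continue
--
--         l += len(block[i])
--
--         if l >= position:
--             break
--
--     return i, [len(block[i]) - (l - position)]
-- ===== SOURCE B (Python) =====
-- from itertools import accumulate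
-- from bisect import bisect_left
--
--
-- def get_text_location_index(block, line_num, position):
--     n = len(block)
--     start = max(0, line_num)
--     if start >= n:
--         i, l = n - 1, 0
--     else:
--         cums = list(accumulate(len(line) for line in block[start:]))
--         k = bisect_left(cums, position)
--         if k < len(cums):
--             i, l = start + k, cums[k]
--         else:
--             i, l = n - 1, cums[-1]
--     return i, [len(block[i]) - (l - position)]
-- ===== Notes on version B (the rewrite author's own statement) =====
-- stated objective: alternative
-- what changed: A's single element-by-element scan (skip, accumulate, break on first crossing) is replaced by building a prefix-sum table of line lengths from max(0, line_num) with itertools.accumulate and locating the first cumulative total >= position with bisect.bisect_left, falling back to the last index when no total reaches position.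
import Mathlib
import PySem

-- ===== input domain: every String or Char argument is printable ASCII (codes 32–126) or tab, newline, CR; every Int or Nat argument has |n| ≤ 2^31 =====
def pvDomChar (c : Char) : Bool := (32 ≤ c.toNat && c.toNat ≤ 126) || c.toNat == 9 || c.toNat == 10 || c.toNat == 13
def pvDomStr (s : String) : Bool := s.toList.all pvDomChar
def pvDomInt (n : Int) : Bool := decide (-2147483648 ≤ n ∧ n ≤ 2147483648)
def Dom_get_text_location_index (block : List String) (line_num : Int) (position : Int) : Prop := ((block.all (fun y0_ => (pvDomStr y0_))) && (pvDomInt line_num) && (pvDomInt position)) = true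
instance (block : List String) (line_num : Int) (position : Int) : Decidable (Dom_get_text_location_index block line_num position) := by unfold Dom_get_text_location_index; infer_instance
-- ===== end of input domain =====

-- B replaces A's element-by-element scan with a prefix-sum table plus bisect_left
-- (first cumulative total ≥ position); objective: alternative decomposition, same result.

-- ===== PORT A =====
-- A's 'for i in range(len(block))' loop: 'continue' while i < line_num, then accumulate l,
-- 'break' once l >= position; falling through leaves i = len(block)-1.
def pvALoop (block : List String) (line_num : Int) (position : Int) (n : Nat) (l : Int) (j : Nat) :
    Int × Int :=
  if _h : j < n then
    if (j : Int) < line_num then pvALoop block line_num position n l (j + 1)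
    else
      let l' := l + PySem.Str.len (block.getD j "")
      if position ≤ l' then ((j : Int), l')
      else pvALoop block line_num position n l' (j + 1)
  else ((n : Int) - 1, l)
termination_by n - j

def get_text_location_index (block : List String) (line_num : Int) (position : Int) : Int × List Int :=
  let r := pvALoop block line_num position block.length 0 0
  -- block[i]: in range whenever block ≠ [] (Pre_); on [] Python raises IndexError
  (r.1, [PySem.Str.len ((PySem.List.pyGet? block r.1).getD "") - (r.2 - position)])

-- ===== PORT B =====
-- itertools.accumulate(len(line) for line in ys) starting from offset l (Source B calls it with l = 0)
def pvAccum (l : Int) : List String → List Int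
  | [] => []
  | y :: t => (l + PySem.Str.len y) :: pvAccum (l + PySem.Str.len y) t

def get_text_location_index_alt (block : List String) (line_num : Int) (position : Int) :
    Int × List Int :=
  let n : Int := PySem.List.len block
  let start : Int := max 0 line_num
  let r : Int × Int :=
    if n ≤ start then (n - 1, 0)
    else
      -- block[start:] with 0 ≤ start is List.drop start.toNat
      let cums := pvAccum 0 (block.drop start.toNat)
      let k := PySem.List.bisectLeft cums position
      if k < cums.length then (start + (k : Int), cums.getD k 0)
      else (n - 1, cums.getD (cums.length - 1) 0)   -- cums[-1]; cums ≠ [] in this branch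
  (r.1, [PySem.Str.len ((PySem.List.pyGet? block r.1).getD "") - (r.2 - position)])

-- ===== PRECONDITION & SPEC =====
-- Pre_ excludes only block = [], on which A raises IndexError (block[i] after the empty loop).
def Pre_get_text_location_index (block : List String) (line_num : Int) (position : Int) : Prop :=
  block ≠ []
instance (block : List String) (line_num : Int) (position : Int) :
    Decidable (Pre_get_text_location_index block line_num position) := by
  unfold Pre_get_text_location_index; infer_instance

def pvWitness_get_text_location_index : List String × Int × Int := (["ab", "cd"], 0, 3)

def Spec_get_text_location_index (block : List String) (line_num : Int) (position : Int) (out : Int × List Int) : Prop := out = get_text_location_index_alt block line_num position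
instance (block : List String) (line_num : Int) (position : Int) (out : Int × List Int) : Decidable (Spec_get_text_location_index block line_num position out) := by unfold Spec_get_text_location_index; infer_instance

-- ===== CLAIM (what is proved, stated in full; the proofs are below) =====
def Claim_equal_get_text_location_index : Prop := ∀ (block : List String) (line_num : Int) (position : Int), Dom_get_text_location_index block line_num position → Pre_get_text_location_index block line_num position → Spec_get_text_location_index block line_num position (get_text_location_index block line_num position)

-- ===== LEMMAS AND PROOFS =====

-- reference form of the scanning phase (indices ≥ line_num): walk the suffix ys accumulating l
def pvScanRef (position : Int) (l : Int) (j : Nat) (n : Nat) : List String → Int × Int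
  | [] => ((n : Int) - 1, l)
  | y :: t =>
      let l' := l + PySem.Str.len y
      if position ≤ l' then ((j : Int), l') else pvScanRef position l' (j + 1) n t

-- Phase 1: while j < line_num the A-loop just advances
theorem pvALoop_skip (block : List String) (line_num position : Int) (n : Nat) (l : Int)
    (s : Nat) (hs : s ≤ n) (hline : ∀ j' : Nat, j' < s → (j' : Int) < line_num) :
    ∀ j, j ≤ s → pvALoop block line_num position n l j = pvALoop block line_num position n l s := by
  intro j hj
  induction hd : s - j generalizing j with
  | zero => have : j = s := by omega
            rw [this]
  | succ m ih =>
    have hjs : j < s := by omega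
    have hjn : j < n := by omega
    have hjl : (j : Int) < line_num := hline j hjs
    rw [pvALoop, dif_pos hjn, if_pos hjl]
    exact ih (j + 1) (by omega) (by omega)

-- Phase 2: from an index ≥ line_num, the A-loop is pvScanRef on the remaining suffix
theorem pvALoop_scan (block : List String) (line_num position : Int) :
    ∀ (ys : List String) (j : Nat) (l : Int), ys = block.drop j →
      j + ys.length = block.length → line_num ≤ (j : Int) →
      pvALoop block line_num position block.length l j =
        pvScanRef position l j block.length ys := by
  intro ys
  induction ys with
  | nil =>
    intro j l hdrop hlen hline
    have hj : j = block.length := by simp at hlen; omega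
    rw [pvALoop, dif_neg (by omega)]
    rfl
  | cons y t ih =>
    intro j l hdrop hlen hline
    have hjn : j < block.length := by simp at hlen; omega
    have h0 : block[j]? = some y := by
      have h0 : (block.drop j)[0]? = some y := by rw [← hdrop]; rfl
      rw [List.getElem?_drop] at h0
      simpa using h0
    have hy : block.getD j "" = y := by simp [List.getD, h0]
    have ht : t = block.drop (j + 1) := by
      have h1 : (block.drop j).tail = block.drop (j + 1) := by
        rw [← List.drop_drop]; simp [List.tail_drop]
      rw [← hdrop] at h1
      simpa using h1
    rw [pvALoop, dif_pos hjn, if_neg (by omega)]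
    simp only [hy, pvScanRef]
    by_cases hp : position ≤ l + PySem.Str.len y
    · rw [if_pos hp, if_pos hp]
    · rw [if_neg hp, if_neg hp]
      exact ih (j + 1) (l + PySem.Str.len y) ht (by simp at hlen ⊢; omega)
        (by push_cast; omega)

theorem pvAccum_le (l : Int) (ys : List String) : ∀ c ∈ pvAccum l ys, l ≤ c := by
  induction ys generalizing l with
  | nil => simp [pvAccum]
  | cons y t ih =>
    intro c hc
    simp [pvAccum] at hc
    have hlen : (0:Int) ≤ PySem.Str.len y := by rw [PySem.Str.len_eq]; positivity
    rcases hc with h | h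
    · omega
    · have := ih (l + PySem.Str.len y) c h; omega

theorem pvAccum_sorted (l : Int) (ys : List String) :
    List.Pairwise (· ≤ ·) (pvAccum l ys) := by
  induction ys generalizing l with
  | nil => simp [pvAccum]
  | cons y t ih =>
    simp only [pvAccum, List.pairwise_cons]
    exact ⟨fun c hc => pvAccum_le _ _ c hc, ih _⟩

-- on a sorted list bisect_left is the first index whose element is ≥ the key
theorem pvBisect_eq_findIdx (xs : List Int) (x : Int) (hs : List.Pairwise (· ≤ ·) xs) :
    PySem.List.bisectLeft xs x = xs.findIdx (fun c => decide (x ≤ c)) := by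
  obtain ⟨hle, hlt, hge⟩ := PySem.List.bisectLeft_spec xs x hs
  set k1 := PySem.List.bisectLeft xs x with hk1
  set k2 := xs.findIdx (fun c => decide (x ≤ c)) with hk2
  have hk2le : k2 ≤ xs.length := List.findIdx_le_length
  rcases lt_trichotomy k1 k2 with h | h | h
  · have h1 : k1 < xs.length := lt_of_lt_of_le h hk2le
    have := List.not_of_lt_findIdx (p := fun c => decide (x ≤ c)) (xs := xs) h
    simp at this
    have := hge k1 h1 le_rfl
    omega
  · exact h
  · have h2 : k2 < xs.length := lt_of_lt_of_le h hle
    have hp : (fun c => decide (x ≤ c)) (xs[k2]'h2) = true := List.findIdx_getElem (w := h2)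
    simp at hp
    have := hlt k2 h2 h
    omega

-- the B-side table lookup computes pvScanRef
theorem pvTable_eq_scan (position : Int) (n : Nat) :
    ∀ (ys : List String) (s : Nat) (l : Int), ys ≠ [] → s + ys.length = n →
      (let cums := pvAccum l ys
       let k := cums.findIdx (fun c => decide (position ≤ c))
       if k < cums.length then ((s : Int) + (k : Int), cums.getD k 0)
       else ((n : Int) - 1, cums.getD (cums.length - 1) 0)) =
      pvScanRef position l s n ys := by
  intro ys
  induction ys with
  | nil => intro s l hne; exact absurd rfl hne
  | cons y t ih =>
    intro s l _ hlen
    set a := l + PySem.Str.len y with ha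
    have hacc : pvAccum l (y :: t) = a :: pvAccum a t := rfl
    have hscan : pvScanRef position l s n (y :: t) =
        if position ≤ a then ((s : Int), a) else pvScanRef position a (s + 1) n t := rfl
    simp only [hacc, hscan, List.findIdx_cons, List.length_cons]
    by_cases hp : position ≤ a
    · rw [if_pos hp]
      simp only [decide_eq_true hp, cond_true]
      rw [if_pos (by omega)]
      simp
    · rw [if_neg hp]
      simp only [decide_eq_false hp, cond_false]
      rcases t with _ | ⟨z, t'⟩
      · simp only [pvAccum, List.findIdx_nil, List.length_nil]
        rw [if_neg (by omega)]
        simp [pvScanRef, List.getD]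
      · have hih := ih (s + 1) a (by simp) (by simp at hlen ⊢; omega)
        simp only at hih
        rw [← hih]
        set cums' := pvAccum a (z :: t') with hc
        have hlc : cums'.length ≠ 0 := by rw [hc]; simp [pvAccum]
        set k' := cums'.findIdx (fun c => decide (position ≤ c)) with hk
        by_cases hkl : k' < cums'.length
        · rw [if_pos (by omega), if_pos hkl, List.getD_cons_succ]
          simp only [Prod.mk.injEq, and_true]
          push_cast
          ring
        · rw [if_neg (by omega), if_neg hkl]
          rw [show cums'.length + 1 - 1 = (cums'.length - 1) + 1 by omega, List.getD_cons_succ]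

theorem pvMain (block : List String) (ln pos : Int) (hne : block ≠ []) :
    get_text_location_index block ln pos = get_text_location_index_alt block ln pos := by
  have hn : 0 < block.length := List.length_pos_of_ne_nil hne
  simp only [get_text_location_index, get_text_location_index_alt, PySem.List.len_eq]
  by_cases hc : (block.length : Int) ≤ max 0 ln
  · rw [if_pos hc]
    have hln : (block.length : Int) ≤ ln := by
      rcases max_cases 0 ln with ⟨h1, h2⟩ | ⟨h1, h2⟩ <;> rw [h1] at hc <;> omega
    rw [pvALoop_skip block ln pos block.length 0 block.length le_rfl
        (fun j hj => by omega) 0 (by omega)]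
    rw [pvALoop, dif_neg (lt_irrefl _)]
  · rw [if_neg hc]
    have hsc : (((max 0 ln).toNat : Int)) = max 0 ln := Int.toNat_of_nonneg (le_max_left 0 ln)
    rw [← hsc] at hc
    have hsn : (max 0 ln).toNat < block.length := by omega
    rw [pvALoop_skip block ln pos block.length 0 ((max 0 ln).toNat) (le_of_lt hsn)
        (fun j hj => by
          have hj' : (j : Int) < ((max 0 ln).toNat : Int) := by exact_mod_cast hj
          rcases max_cases 0 ln with ⟨h1, h2⟩ | ⟨h1, h2⟩ <;> rw [h1] at hsc <;> omega) 0 (by omega)]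
    rw [pvALoop_scan block ln pos (block.drop ((max 0 ln).toNat)) ((max 0 ln).toNat) 0 rfl
        (by simp; omega) (by rw [hsc]; exact le_max_right 0 ln)]
    rw [← pvTable_eq_scan pos block.length (block.drop ((max 0 ln).toNat)) ((max 0 ln).toNat) 0
        (by rw [ne_eq, List.drop_eq_nil_iff]; omega) (by simp; omega)]
    rw [pvBisect_eq_findIdx _ _ (pvAccum_sorted _ _), hsc]

-- ===== VERDICT (by name: the statement is the Claim_ definition above) =====
theorem get_text_location_index_spec : Claim_equal_get_text_location_index := by
  intro block line_num position _hdom hpre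
  unfold Spec_get_text_location_index
  exact pvMain block line_num position hpre
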